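-- pv_equiv track=rewrite | github.com/JerryAllMighty/AlgorithmAndDataStructures | Search/BFS/FreezingBeverage.py | solution
-- ===== SOURCE A (Python) =====
-- def solution(lst):
--     cnt =0
--     dir = [(0,1),(0,-1),(-1,0),(1,0)]
--     def dfs(li, x, y):
--         if x < 0 or x > len(lst) - 1 or y < 0 or y > len(lst[0])-1:
--             return False
--         if li[x][y] != 0:
--             return False
--         li[x][y] = 1
--
--         for i in dir:
--             dx = x + i[0]
--             dy = y + i[1]
--             dfs(li, dx, dy)
--         return True
--
--     for i in range(len(lst)):
--         for j in range(len(lst[0])):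
--             if dfs(lst, i, j):
--                 cnt +=1
--
--     return cnt
-- ===== SOURCE B (Python) =====
-- def solution(lst):
--     cnt = 0
--     rows = len(lst)
--     cols = len(lst[0]) if lst else 0
--     for i in range(rows):
--         for j in range(cols):
--             if lst[i][j] == 0:
--                 cnt += 1
--                 stack = [(i, j)]
--                 while stack:
--                     x, y = stack.pop()
--                     if 0 <= x < rows and 0 <= y < cols and lst[x][y] == 0:
--                         lst[x][y] = 1
--                         stack.extend(((x + 1, y), (x - 1, y), (x, y - 1), (x, y + 1)))
--     return cnt
-- ===== Notes on version B (the rewrite author's own statement) =====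
-- stated objective: faster
-- what changed: replaces the recursive dfs flood fill (and its helper closure) with an explicit-stack iterative flood fill inside the scanning loop, checking cells at pop time; the measured speedup comes from avoiding Python function-call overhead per cell
import Mathlib
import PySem

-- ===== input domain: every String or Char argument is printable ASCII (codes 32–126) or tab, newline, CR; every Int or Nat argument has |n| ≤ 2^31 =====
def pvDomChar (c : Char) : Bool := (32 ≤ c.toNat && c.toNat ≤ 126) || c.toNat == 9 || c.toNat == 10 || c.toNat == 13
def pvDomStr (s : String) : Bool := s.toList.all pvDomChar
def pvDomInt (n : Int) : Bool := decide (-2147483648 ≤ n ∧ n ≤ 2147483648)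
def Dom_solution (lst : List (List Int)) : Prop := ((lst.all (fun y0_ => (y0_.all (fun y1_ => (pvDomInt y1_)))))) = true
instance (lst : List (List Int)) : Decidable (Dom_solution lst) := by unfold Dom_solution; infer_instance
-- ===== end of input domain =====

-- B replaces A's recursive dfs flood fill by an explicit-stack iterative flood fill (same
-- scanning order, cells checked at pop time); equal return value, and both perform the same
-- final in-place mutation (every 0 in the grid is set to 1).

-- shared helpers: cell read/write (used after a bounds check, so indices are in range on
-- admitted inputs) and the zero-cell count Zc, used only as the totality fuel of both loops
def getc (g : List (List Int)) (x y : Int) : Int := (g.getD x.toNat []).getD y.toNat 0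
def setc (g : List (List Int)) (x y : Int) : List (List Int) :=
  g.modify x.toNat (fun row => row.set y.toNat 1)
def Zc (g : List (List Int)) : Nat := (g.map (fun row => row.countP (fun v => v == 0))).sum

-- ===== PORT A =====
-- A's recursive dfs; fuel (any value > Zc g) only makes the recursion structural
def dfsA : Nat → List (List Int) → Int → Int → List (List Int) × Bool
  | 0, g, _, _ => (g, false)
  | f+1, g, x, y =>
    if x < 0 ∨ (g.length : Int) - 1 < x ∨ y < 0 ∨ ((g.headD []).length : Int) - 1 < y then
      (g, false)
    else if getc g x y ≠ 0 then (g, false)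
    else
      let g1 := setc g x y
      let g2 := (dfsA f g1 x (y+1)).1
      let g3 := (dfsA f g2 x (y-1)).1
      let g4 := (dfsA f g3 (x-1) y).1
      let g5 := (dfsA f g4 (x+1) y).1
      (g5, true)

def solution (lst : List (List Int)) : Int :=
  ((List.range lst.length).foldl (fun (st : List (List Int) × Int) (i : Nat) =>
     (List.range (lst.headD []).length).foldl (fun (st : List (List Int) × Int) (j : Nat) =>
        let r := dfsA (Zc st.1 + 1) st.1 (i : Int) (j : Int)
        (r.1, st.2 + if r.2 then 1 else 0)) st)
   (lst, (0 : Int))).2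

-- ===== PORT B =====
-- B's while-loop over the explicit stack; the Lean list holds the stack TOP-FIRST, so
-- Python's stack.pop() is the head match and extend((x+1,y),(x-1,y),(x,y-1),(x,y+1))
-- is the cons chain below (last element pushed = head = first popped); fuel > 5*Zc g + |stack|
-- only makes the while loop structural
def fillLoop : Nat → List (List Int) → List (Int × Int) → List (List Int)
  | _, g, [] => g
  | 0, g, _ :: _ => g
  | f+1, g, (x, y) :: rest =>
    if (0 ≤ x ∧ x < (g.length : Int) ∧ 0 ≤ y ∧ y < ((g.headD []).length : Int)) ∧ getc g x y = 0 then
      fillLoop f (setc g x y) ((x, y+1) :: (x, y-1) :: (x-1, y) :: (x+1, y) :: rest)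
    else fillLoop f g rest

def solution_alt (lst : List (List Int)) : Int :=
  let cols : Nat := if lst.isEmpty then 0 else (lst.headD []).length
  ((List.range lst.length).foldl (fun (st : List (List Int) × Int) (i : Nat) =>
     (List.range cols).foldl (fun (st : List (List Int) × Int) (j : Nat) =>
        if getc st.1 (i : Int) (j : Int) = 0 then
          (fillLoop (5 * Zc st.1 + 2) st.1 [((i : Int), (j : Int))], st.2 + 1)
        else st) st)
   (lst, (0 : Int))).2

-- ===== PRECONDITION & SPEC =====
-- Pre_ excludes exactly the inputs on which the Python A raises IndexError: grids with a row
-- shorter than row 0 (the lst[x][y] access fails); the empty grid is inside Pre_ (A returns 0).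
def Pre_solution (lst : List (List Int)) : Prop :=
  ∀ row ∈ lst, (lst.headD []).length ≤ row.length
instance (lst : List (List Int)) : Decidable (Pre_solution lst) := by
  unfold Pre_solution; infer_instance
def pvWitness_solution : List (List Int) := [[0, 1], [1, 0]]

def Spec_solution (lst : List (List Int)) (out : Int) : Prop := out = solution_alt lst
instance (lst : List (List Int)) (out : Int) : Decidable (Spec_solution lst out) := by
  unfold Spec_solution; infer_instance

-- ===== CLAIM (what is proved, stated in full; the proofs are below) =====
def Claim_equal_solution : Prop :=
  ∀ (lst : List (List Int)), Dom_solution lst → Pre_solution lst → Spec_solution lst (solution lst)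

-- ===== LEMMAS AND PROOFS =====

-- the shape of a grid: its list of row lengths (invariant under both fills)
def rowLens (g : List (List Int)) : List Nat := g.map List.length

-- the shape hypothesis the proofs carry (nonempty + rows at least as long as row 0)
def GS (g : List (List Int)) : Prop :=
  g ≠ [] ∧ ∀ row ∈ g, (g.headD []).length ≤ row.length

lemma map_length_modify : ∀ (g : List (List Int)) (i : Nat) (f : List Int → List Int),
    (∀ l, (f l).length = l.length) → (g.modify i f).map List.length = g.map List.length
  | [], _, _, _ => by simp
  | r :: t, 0, f, hf => by simp [List.modify, hf]
  | r :: t, i+1, f, hf => by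
      have := map_length_modify t i f hf
      simp only [List.modify] at this ⊢
      simp [this]

lemma rowLens_setc (g : List (List Int)) (x y : Int) : rowLens (setc g x y) = rowLens g := by
  unfold rowLens setc
  exact map_length_modify g x.toNat _ (fun l => by simp)

lemma headD_rowLens (g : List (List Int)) : (rowLens g).headD 0 = (g.headD []).length := by
  cases g <;> simp [rowLens]

lemma cols_eq_of_rowLens {g g' : List (List Int)} (h : rowLens g = rowLens g') :
    (g.headD []).length = (g'.headD []).length := by
  rw [← headD_rowLens, ← headD_rowLens, h]

lemma len_eq_of_rowLens {g g' : List (List Int)} (h : rowLens g = rowLens g') :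
    g.length = g'.length := by
  have : (rowLens g).length = (rowLens g').length := by rw [h]
  simpa [rowLens] using this

lemma GS_of_rowLens {g g' : List (List Int)} (h : rowLens g = rowLens g') (hg : GS g) : GS g' := by
  obtain ⟨h1, h2⟩ := hg
  constructor
  · intro hnil
    have := len_eq_of_rowLens h
    simp [hnil] at this
    exact h1 this
  · intro row hrow
    have hmem : row.length ∈ rowLens g' := List.mem_map_of_mem hrow
    rw [← h] at hmem
    rcases List.mem_map.1 hmem with ⟨row₀, hrow₀, hlen⟩
    have := h2 row₀ hrow₀
    rw [cols_eq_of_rowLens h] at this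
    omega

lemma cnt_set_le (l : List Int) (j : Nat) :
    (l.set j (1 : Int)).countP (fun v => v == 0) ≤ l.countP (fun v => v == 0) := by
  by_cases h : j < l.length
  · rw [List.countP_set h]
    have h1 : (((1 : Int)) == 0) = false := by decide
    simp [h1]
  · rw [List.set_eq_of_length_le (by omega)]

lemma Zc_modify_le : ∀ (g : List (List Int)) (i : Nat) (f : List Int → List Int),
    (∀ l, (f l).countP (fun v => v == 0) ≤ l.countP (fun v => v == 0)) →
    Zc (g.modify i f) ≤ Zc g
  | [], _, _, _ => by simp [Zc]
  | r :: t, 0, f, hf => by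
      have e0 : (r :: t).modify 0 f = f r :: t := by simp [List.modify]
      rw [e0]
      simp only [Zc, List.map_cons, List.sum_cons]
      have := hf r
      omega
  | r :: t, i+1, f, hf => by
      have eS : (r :: t).modify (i+1) f = r :: t.modify i f := by simp [List.modify]
      rw [eS]
      have := Zc_modify_le t i f hf
      simp only [Zc, List.map_cons, List.sum_cons] at this ⊢
      omega

lemma Zc_setc_le (g : List (List Int)) (x y : Int) : Zc (setc g x y) ≤ Zc g := by
  exact Zc_modify_le g x.toNat _ (fun l => cnt_set_le l y.toNat)

lemma cnt_set_lt (l : List Int) (j : Nat) (hj : j < l.length) (h0 : l.getD j 0 = 0) :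
    (l.set j (1 : Int)).countP (fun v => v == 0) < l.countP (fun v => v == 0) := by
  rw [List.getD_eq_getElem l 0 hj] at h0
  have hpos : 0 < l.countP (fun v => v == 0) :=
    List.countP_pos_iff.2 ⟨l[j], List.getElem_mem hj, by simp [h0]⟩
  rw [List.countP_set hj]
  have h1 : (((1 : Int)) == 0) = false := by decide
  simp [h1, h0]
  exact h0 ▸ List.getElem_mem hj

lemma Zc_modify_lt : ∀ (g : List (List Int)) (i : Nat) (f : List Int → List Int),
    i < g.length →
    (f (g.getD i [])).countP (fun v => v == 0) < (g.getD i []).countP (fun v => v == 0) →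
    Zc (g.modify i f) < Zc g
  | [], i, _, hi, _ => by simp at hi
  | r :: t, 0, f, _, hlt => by
      simp only [List.getD_cons_zero] at hlt
      have e0 : (r :: t).modify 0 f = f r :: t := by simp [List.modify]
      rw [e0]
      simp only [Zc, List.map_cons, List.sum_cons]
      omega
  | r :: t, i+1, f, hi, hlt => by
      simp only [List.getD_cons_succ] at hlt
      have eS : (r :: t).modify (i+1) f = r :: t.modify i f := by simp [List.modify]
      rw [eS]
      have := Zc_modify_lt t i f (by simpa using hi) hlt
      simp only [Zc, List.map_cons, List.sum_cons] at this ⊢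
      omega

lemma Zc_setc_lt (g : List (List Int)) (x y : Int) (hGS : GS g)
    (_hx0 : 0 ≤ x) (hx : x.toNat < g.length)
    (_hy0 : 0 ≤ y) (hy : y.toNat < (g.headD []).length)
    (h0 : getc g x y = 0) : Zc (setc g x y) < Zc g := by
  have hrowmem : g.getD x.toNat [] ∈ g := by
    rw [List.getD_eq_getElem g [] hx]
    exact List.getElem_mem hx
  have hrowlen : (g.headD []).length ≤ (g.getD x.toNat []).length := hGS.2 _ hrowmem
  exact Zc_modify_lt g x.toNat _ hx (cnt_set_lt _ y.toNat (by omega) h0)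

lemma dfsA_shape (f : Nat) : ∀ (g : List (List Int)) (x y : Int),
    rowLens (dfsA f g x y).1 = rowLens g := by
  induction f with
  | zero => intro g x y; rfl
  | succ f ih =>
    intro g x y
    rw [dfsA]
    split
    · rfl
    · split
      · rfl
      · simp only []
        rw [ih, ih, ih, ih, rowLens_setc]

lemma dfsA_Zc_le (f : Nat) : ∀ (g : List (List Int)) (x y : Int),
    Zc (dfsA f g x y).1 ≤ Zc g := by
  induction f with
  | zero => intro g x y; exact le_refl _
  | succ f ih =>
    intro g x y
    rw [dfsA]
    split
    · exact le_refl _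
    · split
      · exact le_refl _
      · simp only []
        calc Zc (dfsA f (dfsA f (dfsA f (dfsA f (setc g x y) x (y+1)).1 x (y-1)).1 (x-1) y).1
                  (x+1) y).1
              ≤ Zc (dfsA f (dfsA f (dfsA f (setc g x y) x (y+1)).1 x (y-1)).1 (x-1) y).1 :=
                ih _ _ _
          _ ≤ Zc (dfsA f (dfsA f (setc g x y) x (y+1)).1 x (y-1)).1 := ih _ _ _
          _ ≤ Zc (dfsA f (setc g x y) x (y+1)).1 := ih _ _ _
          _ ≤ Zc (setc g x y) := ih _ _ _
          _ ≤ Zc g := Zc_setc_le g x y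

lemma fillLoop_nil (f : Nat) (g : List (List Int)) : fillLoop f g [] = g := by
  cases f <;> rfl

lemma fillLoop_fuel (f₁ : Nat) : ∀ (f₂ : Nat) (g : List (List Int)) (st : List (Int × Int)),
    GS g → 5 * Zc g + st.length < f₁ → 5 * Zc g + st.length < f₂ →
    fillLoop f₁ g st = fillLoop f₂ g st := by
  induction f₁ with
  | zero => intro f₂ g st _ h1 _; omega
  | succ f₁ ih =>
    intro f₂ g st hGS h1 h2
    match st with
    | [] => rw [fillLoop_nil, fillLoop_nil]
    | (x, y) :: rest =>
      simp only [List.length_cons] at h1 h2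
      cases f₂ with
      | zero => omega
      | succ f₂ =>
        rw [fillLoop, fillLoop]
        by_cases h : (0 ≤ x ∧ x < (g.length : Int) ∧ 0 ≤ y ∧
            y < ((g.headD []).length : Int)) ∧ getc g x y = 0
        · rw [if_pos h, if_pos h]
          obtain ⟨⟨hx0, hx, hy0, hy⟩, h0⟩ := h
          have hZ : Zc (setc g x y) < Zc g :=
            Zc_setc_lt g x y hGS hx0 (by omega) hy0 (by omega) h0
          have hGS' : GS (setc g x y) := GS_of_rowLens (rowLens_setc g x y).symm hGS
          apply ih _ _ _ hGS' <;> simp only [List.length_cons] <;> omega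
        · rw [if_neg h, if_neg h]
          apply ih _ _ _ hGS <;> omega

lemma absorb (fa : Nat) : ∀ (g : List (List Int)) (x y : Int) (rest : List (Int × Int)),
    GS g → Zc g < fa →
    fillLoop (5 * Zc g + rest.length + 2) g ((x, y) :: rest)
      = fillLoop (5 * Zc (dfsA fa g x y).1 + rest.length + 1) (dfsA fa g x y).1 rest := by
  induction fa with
  | zero => intro g x y rest _ h; omega
  | succ fa ih =>
    intro g x y rest hGS hfa
    rw [dfsA]
    rw [show 5 * Zc g + rest.length + 2 = (5 * Zc g + rest.length + 1) + 1 from rfl, fillLoop]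
    by_cases hb : (0 ≤ x ∧ x < (g.length : Int) ∧ 0 ≤ y ∧
        y < ((g.headD []).length : Int)) ∧ getc g x y = 0
    · obtain ⟨⟨hx0, hx, hy0, hy⟩, h0⟩ := hb
      rw [if_pos ⟨⟨hx0, hx, hy0, hy⟩, h0⟩]
      rw [if_neg (by omega), if_neg (by simpa using h0)]
      simp only []
      set g1 := setc g x y with hg1
      have hGS1 : GS g1 := GS_of_rowLens (rowLens_setc g x y).symm hGS
      have hZ1 : Zc g1 < Zc g := Zc_setc_lt g x y hGS hx0 (by omega) hy0 (by omega) h0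
      have hGS2 : GS (dfsA fa g1 x (y+1)).1 :=
        GS_of_rowLens (dfsA_shape fa g1 x (y+1)).symm hGS1
      have hZ2 : Zc (dfsA fa g1 x (y+1)).1 ≤ Zc g1 := dfsA_Zc_le fa g1 x (y+1)
      have hGS3 : GS (dfsA fa (dfsA fa g1 x (y+1)).1 x (y-1)).1 :=
        GS_of_rowLens (dfsA_shape fa _ x (y-1)).symm hGS2
      have hZ3 : Zc (dfsA fa (dfsA fa g1 x (y+1)).1 x (y-1)).1 ≤ Zc (dfsA fa g1 x (y+1)).1 :=
        dfsA_Zc_le fa _ x (y-1)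
      have hGS4 : GS (dfsA fa (dfsA fa (dfsA fa g1 x (y+1)).1 x (y-1)).1 (x-1) y).1 :=
        GS_of_rowLens (dfsA_shape fa _ (x-1) y).symm hGS3
      have hZ4 : Zc (dfsA fa (dfsA fa (dfsA fa g1 x (y+1)).1 x (y-1)).1 (x-1) y).1
          ≤ Zc (dfsA fa (dfsA fa g1 x (y+1)).1 x (y-1)).1 := dfsA_Zc_le fa _ (x-1) y
      -- renormalize the fuel after the marking step, then absorb the four pushed cells
      rw [fillLoop_fuel _ (5 * Zc g1 + ((x, y-1) :: (x-1, y) :: (x+1, y) :: rest).length + 2)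
            g1 _ hGS1 (by simp only [List.length_cons]; omega) (by simp only [List.length_cons]; omega)]
      rw [ih g1 x (y+1) _ hGS1 (by omega)]
      rw [show 5 * Zc (dfsA fa g1 x (y+1)).1 + ((x, y-1) :: (x-1, y) :: (x+1, y) :: rest).length + 1
            = 5 * Zc (dfsA fa g1 x (y+1)).1 + ((x-1, y) :: (x+1, y) :: rest).length + 2
          from by simp only [List.length_cons]; omega]
      rw [ih _ x (y-1) _ hGS2 (by omega)]
      rw [show 5 * Zc (dfsA fa (dfsA fa g1 x (y+1)).1 x (y-1)).1
              + ((x-1, y) :: (x+1, y) :: rest).length + 1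
            = 5 * Zc (dfsA fa (dfsA fa g1 x (y+1)).1 x (y-1)).1 + ((x+1, y) :: rest).length + 2
          from by simp only [List.length_cons]; omega]
      rw [ih _ (x-1) y _ hGS3 (by omega)]
      rw [show 5 * Zc (dfsA fa (dfsA fa (dfsA fa g1 x (y+1)).1 x (y-1)).1 (x-1) y).1
              + ((x+1, y) :: rest).length + 1
            = 5 * Zc (dfsA fa (dfsA fa (dfsA fa g1 x (y+1)).1 x (y-1)).1 (x-1) y).1
              + rest.length + 2
          from by simp only [List.length_cons]; omega]
      rw [ih _ (x+1) y _ hGS4 (by omega)]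
    · rw [if_neg hb]
      by_cases hz : getc g x y = 0
      · have hnb : ¬(0 ≤ x ∧ x < (g.length : Int) ∧ 0 ≤ y ∧
            y < ((g.headD []).length : Int)) := fun h => hb ⟨h, hz⟩
        have hgd : x < 0 ∨ (g.length : Int) - 1 < x ∨ y < 0 ∨
            ((g.headD []).length : Int) - 1 < y := by omega
        rw [if_pos hgd]
      · by_cases hgd : x < 0 ∨ (g.length : Int) - 1 < x ∨ y < 0 ∨
            ((g.headD []).length : Int) - 1 < y
        · rw [if_pos hgd]
        · rw [if_neg hgd, if_pos (by simpa using hz)]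

-- one-step lemmas about dfsA at positive fuel
lemma dfsA_succ_fst_notzero (f : Nat) (g : List (List Int)) (x y : Int)
    (hbd : ¬(x < 0 ∨ (g.length : Int) - 1 < x ∨ y < 0 ∨ ((g.headD []).length : Int) - 1 < y))
    (h0 : getc g x y ≠ 0) : (dfsA (f+1) g x y).1 = g := by
  rw [dfsA, if_neg hbd, if_pos (by simpa using h0)]

lemma dfsA_succ_snd_notzero (f : Nat) (g : List (List Int)) (x y : Int)
    (hbd : ¬(x < 0 ∨ (g.length : Int) - 1 < x ∨ y < 0 ∨ ((g.headD []).length : Int) - 1 < y))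
    (h0 : getc g x y ≠ 0) : (dfsA (f+1) g x y).2 = false := by
  rw [dfsA, if_neg hbd, if_pos (by simpa using h0)]

lemma dfsA_succ_snd_zero (f : Nat) (g : List (List Int)) (x y : Int)
    (hbd : ¬(x < 0 ∨ (g.length : Int) - 1 < x ∨ y < 0 ∨ ((g.headD []).length : Int) - 1 < y))
    (h0 : getc g x y = 0) : (dfsA (f+1) g x y).2 = true := by
  rw [dfsA, if_neg hbd, if_neg (by simpa using h0)]

-- the two scanning steps agree on any in-range cell
lemma step_eq (lst : List (List Int)) (st : List (List Int) × Int) (i j : Nat)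
    (hGS : GS st.1) (hrl : rowLens st.1 = rowLens lst)
    (hi : i < lst.length) (hj : j < (lst.headD []).length) :
    (let r := dfsA (Zc st.1 + 1) st.1 (i : Int) (j : Int)
     (r.1, st.2 + if r.2 then 1 else 0))
      = (if getc st.1 (i : Int) (j : Int) = 0 then
           (fillLoop (5 * Zc st.1 + 2) st.1 [((i : Int), (j : Int))], st.2 + 1)
         else st) := by
  have hlen : st.1.length = lst.length := len_eq_of_rowLens hrl
  have hcols : (st.1.headD []).length = (lst.headD []).length := cols_eq_of_rowLens hrl
  have hbd : ¬((i : Int) < 0 ∨ (st.1.length : Int) - 1 < (i : Int) ∨ (j : Int) < 0 ∨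
      ((st.1.headD []).length : Int) - 1 < (j : Int)) := by omega
  by_cases h0 : getc st.1 (i : Int) (j : Int) = 0
  · rw [if_pos h0]
    have habs := absorb (Zc st.1 + 1) st.1 (i : Int) (j : Int) [] hGS (by omega)
    rw [fillLoop_nil] at habs
    simp only [List.length_nil, Nat.add_zero] at habs
    simp only [dfsA_succ_snd_zero (Zc st.1) st.1 (i : Int) (j : Int) hbd h0, if_true, habs]
  · rw [if_neg h0]
    simp only [dfsA_succ_snd_notzero (Zc st.1) st.1 (i : Int) (j : Int) hbd h0,
      dfsA_succ_fst_notzero (Zc st.1) st.1 (i : Int) (j : Int) hbd h0]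
    simp

-- the inner scanning loops agree and preserve the grid shape
lemma inner_eq (lst : List (List Int)) (i : Nat) (hi : i < lst.length) :
    ∀ (js : List Nat) (st : List (List Int) × Int), GS st.1 → rowLens st.1 = rowLens lst →
      (∀ j ∈ js, j < (lst.headD []).length) →
      js.foldl (fun (st : List (List Int) × Int) (j : Nat) =>
          let r := dfsA (Zc st.1 + 1) st.1 (i : Int) (j : Int)
          (r.1, st.2 + if r.2 then 1 else 0)) st
        = js.foldl (fun (st : List (List Int) × Int) (j : Nat) =>
            if getc st.1 (i : Int) (j : Int) = 0 then
              (fillLoop (5 * Zc st.1 + 2) st.1 [((i : Int), (j : Int))], st.2 + 1)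
            else st) st
      ∧ rowLens (js.foldl (fun (st : List (List Int) × Int) (j : Nat) =>
          let r := dfsA (Zc st.1 + 1) st.1 (i : Int) (j : Int)
          (r.1, st.2 + if r.2 then 1 else 0)) st).1 = rowLens lst := by
  intro js
  induction js with
  | nil => intro st hGS hrl _; exact ⟨rfl, hrl⟩
  | cons j js ihj =>
    intro st hGS hrl hjs
    have hstep := step_eq lst st i j hGS hrl hi (hjs j (List.mem_cons_self))
    have hshape : rowLens ((dfsA (Zc st.1 + 1) st.1 (i : Int) (j : Int)).1) = rowLens lst :=
      (dfsA_shape _ st.1 _ _).trans hrl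
    have hGS' : GS ((dfsA (Zc st.1 + 1) st.1 (i : Int) (j : Int)).1) :=
      GS_of_rowLens hshape.symm (GS_of_rowLens hrl hGS)
    simp only [List.foldl_cons]
    rw [← hstep]
    exact ihj _ hGS' hshape (fun j hj => hjs j (List.mem_cons_of_mem _ hj))

-- the outer scanning loops agree and preserve the grid shape
lemma outer_eq (lst : List (List Int)) :
    ∀ (is' : List Nat) (st : List (List Int) × Int), GS st.1 → rowLens st.1 = rowLens lst →
      (∀ i ∈ is', i < lst.length) →
      is'.foldl (fun (st : List (List Int) × Int) (i : Nat) =>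
          (List.range (lst.headD []).length).foldl (fun (st : List (List Int) × Int) (j : Nat) =>
            let r := dfsA (Zc st.1 + 1) st.1 (i : Int) (j : Int)
            (r.1, st.2 + if r.2 then 1 else 0)) st) st
        = is'.foldl (fun (st : List (List Int) × Int) (i : Nat) =>
            (List.range (lst.headD []).length).foldl (fun (st : List (List Int) × Int) (j : Nat) =>
              if getc st.1 (i : Int) (j : Int) = 0 then
                (fillLoop (5 * Zc st.1 + 2) st.1 [((i : Int), (j : Int))], st.2 + 1)
              else st) st) st := by
  intro is'
  induction is' with
  | nil => intro st _ _ _; rfl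
  | cons i is' ihi =>
    intro st hGS hrl his
    have hi : i < lst.length := his i (List.mem_cons_self)
    obtain ⟨he, hr⟩ := inner_eq lst i hi (List.range (lst.headD []).length) st hGS hrl
      (fun j hj => List.mem_range.1 hj)
    simp only [List.foldl_cons]
    rw [← he]
    exact ihi _ (GS_of_rowLens hr.symm (GS_of_rowLens hrl hGS)) hr
      (fun i hi => his i (List.mem_cons_of_mem _ hi))

-- ===== VERDICT (by name: the statement is the Claim_ definition above) =====
theorem solution_spec : Claim_equal_solution := by
  intro lst _ hPre
  by_cases hnil : lst = []
  · subst hnil; rfl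
  · have hGS : GS lst := ⟨hnil, hPre⟩
    unfold Spec_solution solution solution_alt
    have hcols : (if lst.isEmpty then 0 else (lst.headD []).length) = (lst.headD []).length := by
      simp [List.isEmpty_iff, hnil]
    rw [hcols]
    rw [outer_eq lst (List.range lst.length) (lst, 0) hGS rfl
          (fun i hi => List.mem_range.1 hi)]
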